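-- pv_equiv track=rewrite | github.com/dat-2k2/tgraph | Lab1/lab1.py | Shimbell_matrix
-- ===== SOURCE A (Python) =====
-- import copy
--
-- def Shimbell_matrix(length: int, G ,max_min = True):
--     '''Shimbell method requires unweighted'''
--     if (length == 1):
--         return G
--     elif (length == 0):
--         return []
--     else:
--         shimbell = copy.deepcopy(G)
--         '''shimbell = G^ length'''
--         while (length > 1):
--             res = []
--             for row in range (len(G)):
--                 row_ = []
--                 for col in range (len(G)):
--                     '''intialize based on mode'''
--                     if (max_min):
--                         cell = float('inf')
--                     else:
--                         cell = 0
--                     for index in range (len(G)):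
--                         '''find the minimum / maximum path from i to j through any index vertex'''
--                         tmp = (shimbell[row][index] + G[index][col]) if (shimbell[row][index] * G[index][col]) else 0
--                         '''if tmp == 0 skip'''
--                         if (tmp):
--                             if (max_min):
--                                 if (cell > tmp):
--                                     cell = tmp
--                             else:
--                                 if (cell < tmp):
--                                     cell = tmp
--                     '''set infty to 0'''
--                     if (cell == float('inf')):
--                         cell = 0
--                     row_.append(cell)
--                 res.append(row_)
--             shimbell = copy.deepcopy(res)
--             length -= 1
--         return shimbell
-- ===== SOURCE B (Python) =====
-- def Shimbell_matrix(length: int, G, max_min=True):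
--     '''Shimbell power computed by an edge-driven sparse multiplication:
--     the nonzero columns of G are indexed once, each step streams over the
--     nonzero edge pairs (i,k),(k,j) merging candidate path lengths into a
--     dict keyed by (i, j), and the dense matrix is materialized from the
--     dict (equivalence is about the return value: A returns copies, this
--     may return G itself when no multiplication is needed).'''
--     if length == 0:
--         return []
--     if length <= 1:
--         return G
--     n = len(G)
--     # sparse index of G: per row k, its nonzero columns (j, weight)
--     edges = [[(j, row[j]) for j in range(n) if row[j]] for row in G]
--     M = G
--     for _ in range(length - 1):
--         d = {}
--         for k in range(n):
--             col = edges[k]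
--             for i in range(n):
--                 a = M[i][k]
--                 if a == 0:
--                     continue
--                 for (j, b) in col:
--                     t = a + b
--                     if t:
--                         cur = d.get((i, j))
--                         if cur is None or (t < cur if max_min else t > cur):
--                             d[(i, j)] = t
--         if max_min:
--             M = [[d.get((i, j), 0) for j in range(n)] for i in range(n)]
--         else:
--             M = [[max(d.get((i, j), 0), 0) for j in range(n)] for i in range(n)]
--     return M
-- ===== Notes on version B (the rewrite author's own statement) =====
-- stated objective: alternative
-- what changed: The dense per-cell triple loop with an inf/0 sentinel is replaced by an edge-driven sparse multiplication: G's nonzero columns are indexed once, each step streams over nonzero edge pairs (i,k),(k,j) merging candidate path lengths into a dict keyed by (i,j), and the dense matrix is materialized from the dict.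
import Mathlib
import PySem

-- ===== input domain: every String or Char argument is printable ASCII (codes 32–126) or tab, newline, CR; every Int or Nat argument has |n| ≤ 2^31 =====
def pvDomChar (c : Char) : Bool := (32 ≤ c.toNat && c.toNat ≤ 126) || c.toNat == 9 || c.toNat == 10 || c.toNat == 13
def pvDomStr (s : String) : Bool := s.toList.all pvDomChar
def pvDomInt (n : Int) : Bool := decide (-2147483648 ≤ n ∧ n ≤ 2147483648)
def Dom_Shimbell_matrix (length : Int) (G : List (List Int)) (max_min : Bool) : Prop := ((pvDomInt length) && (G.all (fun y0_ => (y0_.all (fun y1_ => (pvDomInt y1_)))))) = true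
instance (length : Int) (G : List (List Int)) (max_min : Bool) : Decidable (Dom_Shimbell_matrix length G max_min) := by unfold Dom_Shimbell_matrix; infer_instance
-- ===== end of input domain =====

-- B replaces A's dense per-cell triple loop (inf/0 sentinel) by an edge-driven
-- sparse multiplication: G's nonzero columns are indexed once, each step merges
-- candidate path lengths of nonzero edge pairs into a dict keyed by (i, j), and
-- the matrix is materialized from the dict; objective: alternative structure.
-- Equivalence is about the return value (A returns copies, B may return G itself).

-- ===== PORT A =====
-- A's innermost loop: cell is float('inf') in min mode, modelled exactly by
-- `none` (it is only compared and finally replaced by 0, both total on Option).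
def pvA_step (max_min : Bool) (a b : Int) (cell : Option Int) : Option Int :=
  let tmp := if a * b ≠ 0 then a + b else 0
  if tmp ≠ 0 then
    match cell with
    | none => some tmp
    | some cv =>
        if max_min then (if cv > tmp then some tmp else some cv)
        else (if cv < tmp then some tmp else some cv)
  else cell

def pvA_cell (sh G : List (List Int)) (max_min : Bool) (row col : Nat) : Int :=
  let c := (List.range G.length).foldl (fun cell index =>
      pvA_step max_min ((sh.getD row []).getD index 0) ((G.getD index []).getD col 0) cell)
    (if max_min then none else some 0)
  match c with
  | none => 0
  | some cv => cv

def pvA_row (sh G : List (List Int)) (max_min : Bool) (row : Nat) : List Int :=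
  (List.range G.length).foldl (fun r col => r ++ [pvA_cell sh G max_min row col]) []

def pvA_mul (sh G : List (List Int)) (max_min : Bool) : List (List Int) :=
  (List.range G.length).foldl (fun r row => r ++ [pvA_row sh G max_min row]) []

def pvA_loop (len : Int) (sh G : List (List Int)) (max_min : Bool) : List (List Int) :=
  if len > 1 then pvA_loop (len - 1) (pvA_mul sh G max_min) G max_min else sh
  termination_by len.toNat
  decreasing_by omega

def Shimbell_matrix (length : Int) (G : List (List Int)) (max_min : Bool) : List (List Int) :=
  if length = 1 then G
  else if length = 0 then []
  else pvA_loop length G G max_min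

-- ===== PORT B =====
-- `cur = d.get(key); if cur is None or (t < cur if max_min else t > cur): d[key] = t`
def pvB_merge (max_min : Bool) (d : PySem.Dict (Int × Int) Int) (key : Int × Int) (t : Int) :
    PySem.Dict (Int × Int) Int :=
  match d.get? key with
  | none => d.insert key t
  | some cur => if (if max_min then t < cur else t > cur) then d.insert key t else d

-- `edges = [[(j, row[j]) for j in range(n) if row[j]] for row in G]`
def pvB_edges (G : List (List Int)) : List (List (Int × Int)) :=
  G.map (fun row => (List.range G.length).filterMap (fun j =>
    if row.getD j 0 ≠ 0 then some (((j : Nat) : Int), row.getD j 0) else none))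

-- the dict built by one multiplication step (loops k, then i, then the sparse column)
def pvB_dict (edges : List (List (Int × Int))) (n : Nat) (max_min : Bool)
    (M : List (List Int)) : PySem.Dict (Int × Int) Int :=
  (List.range n).foldl (fun d k =>
    let col := edges.getD k []
    (List.range n).foldl (fun d i =>
      let a := (M.getD i []).getD k 0
      if a = 0 then d
      else col.foldl (fun d jb =>
        let t := a + jb.2
        if t ≠ 0 then pvB_merge max_min d (((i : Nat) : Int), jb.1) t else d) d) d)
    PySem.Dict.empty

def pvB_mul (edges : List (List (Int × Int))) (n : Nat) (max_min : Bool)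
    (M : List (List Int)) : List (List Int) :=
  if max_min then
    (List.range n).map (fun i => (List.range n).map (fun j =>
      (pvB_dict edges n max_min M).getD (((i : Nat) : Int), ((j : Nat) : Int)) 0))
  else
    (List.range n).map (fun i => (List.range n).map (fun j =>
      max ((pvB_dict edges n max_min M).getD (((i : Nat) : Int), ((j : Nat) : Int)) 0) 0))

def Shimbell_matrix_alt (length : Int) (G : List (List Int)) (max_min : Bool) : List (List Int) :=
  if length = 0 then []
  else if length ≤ 1 then G
  else
    (PySem.List.pyRange 0 (length - 1) 1).foldl
      (fun M _ => pvB_mul (pvB_edges G) G.length max_min M) G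

-- ===== PRECONDITION & SPEC =====
-- Pre_ excludes exactly the inputs where Python A raises IndexError: for
-- length ≥ 2 it reads G[index][col] for all index, col < len(G), so every row
-- must have at least len(G) entries; for length ≤ 1 A never indexes.
def Pre_Shimbell_matrix (length : Int) (G : List (List Int)) (max_min : Bool) : Prop :=
  length ≤ 1 ∨ ∀ row ∈ G, G.length ≤ row.length
instance (length : Int) (G : List (List Int)) (max_min : Bool) : Decidable (Pre_Shimbell_matrix length G max_min) := by unfold Pre_Shimbell_matrix; infer_instance

def pvWitness_Shimbell_matrix : Int × List (List Int) × Bool := (3, [[0, 2, 1], [1, 0, 0], [0, 3, 0]], true)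

def Spec_Shimbell_matrix (length : Int) (G : List (List Int)) (max_min : Bool) (out : List (List Int)) : Prop := out = Shimbell_matrix_alt length G max_min
instance (length : Int) (G : List (List Int)) (max_min : Bool) (out : List (List Int)) : Decidable (Spec_Shimbell_matrix length G max_min out) := by unfold Spec_Shimbell_matrix; infer_instance

-- ===== CLAIM (what is proved, stated in full; the proofs are below) =====
def Claim_equal_Shimbell_matrix : Prop := ∀ (length : Int) (G : List (List Int)) (max_min : Bool), Dom_Shimbell_matrix length G max_min → Pre_Shimbell_matrix length G max_min → Spec_Shimbell_matrix length G max_min (Shimbell_matrix length G max_min)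

-- ===== LEMMAS AND PROOFS =====

-- value-level accumulator update (what pvB_merge does at its own key)
def pvUpd (max_min : Bool) (v : Option Int) (t : Int) : Option Int :=
  match v with
  | none => some t
  | some cur => if (if max_min then t < cur else t > cur) then some t else some cur

theorem pv_merge_get? (max_min : Bool) (d : PySem.Dict (Int × Int) Int)
    (key κ : Int × Int) (t : Int) :
    (pvB_merge max_min d key t).get? κ
      = if κ = key then pvUpd max_min (d.get? κ) t else d.get? κ := by
  by_cases hκ : κ = key
  · subst hκ
    unfold pvB_merge pvUpd
    cases h : d.get? κ <;> simp [PySem.Dict.get?_insert, h] <;> split_ifs <;> simp [h]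
  · unfold pvB_merge
    cases h : d.get? key <;>
      simp [PySem.Dict.get?_insert, hκ] <;> split_ifs <;> simp [PySem.Dict.get?_insert, hκ]

-- if every step's effect on get? κ factors through get? κ, so does the fold's
theorem pv_foldl_get? {α : Type} (κ : Int × Int)
    (F : PySem.Dict (Int × Int) Int → α → PySem.Dict (Int × Int) Int)
    (g : Option Int → α → Option Int)
    (h : ∀ d x, (F d x).get? κ = g (d.get? κ) x) :
    ∀ (l : List α) (d : PySem.Dict (Int × Int) Int),
      (l.foldl F d).get? κ = l.foldl g (d.get? κ) := by
  intro l
  induction l with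
  | nil => intro d; rfl
  | cons x xs ih => intro d; simp only [List.foldl]; rw [ih, h]

theorem pv_foldl_filterMap {α β γ : Type} (f : α → Option β) (g : γ → β → γ) :
    ∀ (l : List α) (init : γ),
      (l.filterMap f).foldl g init
        = l.foldl (fun acc x => match f x with | none => acc | some y => g acc y) init := by
  intro l
  induction l with
  | nil => intro init; rfl
  | cons x xs ih =>
    intro init
    cases h : f x <;> simp [List.filterMap_cons, h, List.foldl, ih]

theorem pv_foldl_id {α β : Type} (l : List α) (v : β)
    (f : β → α → β) (hf : ∀ v x, x ∈ l → f v x = v) : l.foldl f v = v := by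
  induction l generalizing v with
  | nil => rfl
  | cons x xs ih => simp only [List.foldl]; rw [hf v x (by simp), ih _ (fun v x h => hf v x (by simp [h]))]

theorem pv_foldl_range_single {β : Type} (j0 : Nat)
    (f : β → Nat → β) (u : β → β)
    (hf : ∀ v, f v j0 = u v) (hother : ∀ v x, x ≠ j0 → f v x = v) :
    ∀ (n : Nat), j0 < n → ∀ (v : β), (List.range n).foldl f v = u v := by
  intro n
  induction n with
  | zero => omega
  | succ m ih =>
    intro hj v
    rw [List.range_succ, List.foldl_append]
    by_cases hj0 : j0 = m
    · subst hj0
      rw [pv_foldl_id _ v f (fun v x hx => hother v x (by simp at hx; omega))]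
      simp [hf]
    · rw [ih (by omega) v, List.foldl_cons, List.foldl_nil,
        hother _ m (fun h => hj0 h.symm)]

-- get? of B's dict at a fixed in-range key (i0, j0) is a per-k value fold
-- matching A's candidate condition a ≠ 0 ∧ b ≠ 0 ∧ a + b ≠ 0
theorem pv_dict_get? (G M : List (List Int)) (max_min : Bool)
    (hG : ∀ row ∈ G, G.length ≤ row.length) (i0 j0 : Nat)
    (hi : i0 < G.length) (hj : j0 < G.length) :
    (pvB_dict (pvB_edges G) G.length max_min M).get? ((i0 : Int), (j0 : Int))
      = (List.range G.length).foldl (fun v k =>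
          if (M.getD i0 []).getD k 0 ≠ 0 ∧ (G.getD k []).getD j0 0 ≠ 0 ∧
              (M.getD i0 []).getD k 0 + (G.getD k []).getD j0 0 ≠ 0 then
            pvUpd max_min v ((M.getD i0 []).getD k 0 + (G.getD k []).getD j0 0)
          else v) none := by
  set κ : Int × Int := ((i0 : Int), (j0 : Int)) with hκdef
  -- effect of the column fold for a given k, i, a on get? κ
  have hcol : ∀ (col : List (Int × Int)) (i : Nat) (a : Int)
      (d : PySem.Dict (Int × Int) Int),
      (col.foldl (fun d jb =>
          let t := a + jb.2
          if t ≠ 0 then pvB_merge max_min d (((i : Nat) : Int), jb.1) t else d) d).get? κ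
        = col.foldl (fun v jb =>
            if a + jb.2 ≠ 0 then
              (if κ = (((i : Nat) : Int), jb.1) then pvUpd max_min v (a + jb.2) else v)
            else v) (d.get? κ) := by
    intro col i a d
    apply pv_foldl_get?
    intro d jb
    by_cases ht : a + jb.2 = 0
    · simp [ht]
    · simp [ht, pv_merge_get?]
  -- effect of the i-fold for a given k on get? κ
  have hifold : ∀ (k : Nat) (d : PySem.Dict (Int × Int) Int),
      ((List.range G.length).foldl (fun d i =>
          let a := (M.getD i []).getD k 0
          if a = 0 then d
          else ((pvB_edges G).getD k []).foldl (fun d jb =>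
            let t := a + jb.2
            if t ≠ 0 then pvB_merge max_min d (((i : Nat) : Int), jb.1) t else d) d) d).get? κ
        = (List.range G.length).foldl (fun v i =>
            let a := (M.getD i []).getD k 0
            if a = 0 then v
            else ((pvB_edges G).getD k []).foldl (fun v jb =>
              if a + jb.2 ≠ 0 then
                (if κ = (((i : Nat) : Int), jb.1) then pvUpd max_min v (a + jb.2) else v)
              else v) v) (d.get? κ) := by
    intro k d
    apply pv_foldl_get?
    intro d i
    by_cases ha : (M.getD i []).getD k 0 = 0
    · simp only [ha, if_true, ite_true, if_pos]
    · simp only [ha, if_false, ite_false, if_neg, not_false_eq_true]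
      exact hcol _ i _ d
  -- whole dict: value-level nested fold
  have hall := pv_foldl_get? κ
    (fun d k =>
      (List.range G.length).foldl (fun d i =>
        let a := (M.getD i []).getD k 0
        if a = 0 then d
        else ((pvB_edges G).getD k []).foldl (fun d jb =>
          let t := a + jb.2
          if t ≠ 0 then pvB_merge max_min d (((i : Nat) : Int), jb.1) t else d) d) d)
    (fun v k =>
      (List.range G.length).foldl (fun v i =>
        let a := (M.getD i []).getD k 0
        if a = 0 then v
        else ((pvB_edges G).getD k []).foldl (fun v jb =>
          if a + jb.2 ≠ 0 then
            (if κ = (((i : Nat) : Int), jb.1) then pvUpd max_min v (a + jb.2) else v)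
          else v) v) v)
    (fun d k => hifold k d) (List.range G.length) PySem.Dict.empty
  rw [PySem.Dict.get?_empty] at hall
  have hdict : (pvB_dict (pvB_edges G) G.length max_min M).get? κ
      = (List.range G.length).foldl (fun v k =>
          (List.range G.length).foldl (fun v i =>
            let a := (M.getD i []).getD k 0
            if a = 0 then v
            else ((pvB_edges G).getD k []).foldl (fun v jb =>
              if a + jb.2 ≠ 0 then
                (if κ = (((i : Nat) : Int), jb.1) then pvUpd max_min v (a + jb.2) else v)
              else v) v) v) none := hall
  rw [hdict]
  -- now collapse the i-fold (only i = i0 acts) and the column fold (only j = j0 acts)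
  apply PySem.List.foldl_congr_mem
  intro v k hk
  have hkn : k < G.length := List.mem_range.mp hk
  simp only [List.getD_eq_getElem?_getD]
  -- the sparse column of G at k, as a filterMap over the column indices
  have hedgesk : (pvB_edges G)[k]?.getD []
      = (List.range G.length).filterMap (fun j =>
          if (G[k]?.getD [])[j]?.getD 0 ≠ 0 then
            some (((j : Nat) : Int), (G[k]?.getD [])[j]?.getD 0) else none) := by
    simp [pvB_edges, List.getElem?_map, List.getElem?_eq_getElem hkn,
      List.getD_eq_getElem?_getD]
  -- the column fold for i = i0: a single conditional update at j0
  have hcol0 : ∀ (a' : Int) (v : Option Int), a' ≠ 0 →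
      ((pvB_edges G)[k]?.getD []).foldl (fun v jb =>
          if a' + jb.2 ≠ 0 then
            (if κ = ((i0 : Int), jb.1) then pvUpd max_min v (a' + jb.2) else v)
          else v) v
        = if (G[k]?.getD [])[j0]?.getD 0 ≠ 0 ∧ a' + (G[k]?.getD [])[j0]?.getD 0 ≠ 0 then
            pvUpd max_min v (a' + (G[k]?.getD [])[j0]?.getD 0) else v := by
    intro a' v _
    rw [hedgesk, pv_foldl_filterMap]
    refine pv_foldl_range_single j0 _
      (fun w => if (G[k]?.getD [])[j0]?.getD 0 ≠ 0 ∧ a' + (G[k]?.getD [])[j0]?.getD 0 ≠ 0 then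
        pvUpd max_min w (a' + (G[k]?.getD [])[j0]?.getD 0) else w) ?_ ?_ G.length hj v
    · intro v
      by_cases hb : (G[k]?.getD [])[j0]?.getD 0 = 0
      · simp [hb]
      · by_cases hs : a' + (G[k]?.getD [])[j0]?.getD 0 = 0 <;> simp [hb, hs, hκdef]
    · intro v x hx
      by_cases hbx : (G[k]?.getD [])[x]?.getD 0 = 0
      · simp [hbx]
      · simp [hbx, hκdef, Prod.mk.injEq, Nat.cast_inj, Ne.symm hx]
  -- the i-fold: only i = i0 acts
  refine pv_foldl_range_single i0 _
    (fun w => if (M[i0]?.getD [])[k]?.getD 0 ≠ 0 ∧ (G[k]?.getD [])[j0]?.getD 0 ≠ 0 ∧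
        (M[i0]?.getD [])[k]?.getD 0 + (G[k]?.getD [])[j0]?.getD 0 ≠ 0 then
      pvUpd max_min w ((M[i0]?.getD [])[k]?.getD 0 + (G[k]?.getD [])[j0]?.getD 0)
    else w) ?_ ?_ G.length hi v
  · intro v
    by_cases ha : (M[i0]?.getD [])[k]?.getD 0 = 0
    · simp [ha]
    · rw [if_neg ha, hcol0 _ v ha]
      by_cases hb : (G[k]?.getD [])[j0]?.getD 0 = 0 <;>
        by_cases hs : (M[i0]?.getD [])[k]?.getD 0 + (G[k]?.getD [])[j0]?.getD 0 = 0 <;>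
        simp [ha, hb, hs]
  · intro v x hx
    by_cases hax : (M[x]?.getD [])[k]?.getD 0 = 0
    · simp [hax]
    · rw [if_neg hax]
      apply pv_foldl_id
      intro v jb _
      simp [hκdef, Prod.mk.injEq, Nat.cast_inj, Ne.symm hx]
-- max mode: A's fold starts at some 0; B's at none with a final clamp to ≥ 0
def pvPos0 (v : Option Int) : Int :=
  match v with
  | none => 0
  | some c => max c 0

theorem pv_fold_pos0 {α : Type} (f : Option Int → α → Option Int)
    (hf : ∀ c x, f (some (pvPos0 c)) x = some (pvPos0 (f c x))) :
    ∀ (l : List α) (c : Option Int),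
      l.foldl f (some (pvPos0 c)) = some (pvPos0 (l.foldl f c)) := by
  intro l
  induction l with
  | nil => intro c; rfl
  | cons x xs ih => intro c; simp only [List.foldl]; rw [hf, ih]

theorem pv_upd_pos0 (c : Option Int) (t : Int) (cond : Prop) [Decidable cond] :
    (if cond then pvUpd false (some (pvPos0 c)) t else some (pvPos0 c))
      = some (pvPos0 (if cond then pvUpd false c t else c)) := by
  by_cases h : cond
  · cases c <;>
      simp only [h, if_true, pvUpd, pvPos0, max_def] <;>
      split_ifs <;> simp_all <;> omega
  · simp [h]

-- A's inner step, rephrased as a conditional pvUpd update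
theorem pv_stepA_eq (max_min : Bool) (a b : Int) (cell : Option Int) :
    pvA_step max_min a b cell
      = if a ≠ 0 ∧ b ≠ 0 ∧ a + b ≠ 0 then pvUpd max_min cell (a + b) else cell := by
  unfold pvA_step
  by_cases ha : a = 0 <;> by_cases hb : b = 0 <;> by_cases hs : a + b = 0 <;>
    cases cell <;> cases max_min <;>
    simp [pvUpd, ha, hb, hs, mul_eq_zero] <;> split_ifs <;> simp_all

-- one cell, min mode: A's per-cell fold equals B's dict value
theorem pv_cell_eq_min (G M : List (List Int))
    (hG : ∀ row ∈ G, G.length ≤ row.length) (i0 j0 : Nat)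
    (hi : i0 < G.length) (hj : j0 < G.length) :
    pvA_cell M G true i0 j0
      = (pvB_dict (pvB_edges G) G.length true M).getD ((i0 : Int), (j0 : Int)) 0 := by
  have hget := pv_dict_get? G M true hG i0 j0 hi hj
  rw [PySem.Dict.getD_eq_get?_getD, hget]
  unfold pvA_cell
  simp only [pv_stepA_eq, if_true, ite_true]
  cases (List.range G.length).foldl (fun cell index =>
      if (M.getD i0 []).getD index 0 ≠ 0 ∧ (G.getD index []).getD j0 0 ≠ 0 ∧
          (M.getD i0 []).getD index 0 + (G.getD index []).getD j0 0 ≠ 0 then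
        pvUpd true cell ((M.getD i0 []).getD index 0 + (G.getD index []).getD j0 0)
      else cell) none <;> rfl

-- one cell, max mode: A starts at 0; B clamps the dict value to ≥ 0 at the end
theorem pv_cell_eq_max (G M : List (List Int))
    (hG : ∀ row ∈ G, G.length ≤ row.length) (i0 j0 : Nat)
    (hi : i0 < G.length) (hj : j0 < G.length) :
    pvA_cell M G false i0 j0
      = max ((pvB_dict (pvB_edges G) G.length false M).getD ((i0 : Int), (j0 : Int)) 0) 0 := by
  have hget := pv_dict_get? G M false hG i0 j0 hi hj
  rw [PySem.Dict.getD_eq_get?_getD, hget]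
  unfold pvA_cell
  simp only [pv_stepA_eq, Bool.false_eq_true, if_false, ite_false]
  have key : (List.range G.length).foldl (fun v k =>
        if (M.getD i0 []).getD k 0 ≠ 0 ∧ (G.getD k []).getD j0 0 ≠ 0 ∧
            (M.getD i0 []).getD k 0 + (G.getD k []).getD j0 0 ≠ 0 then
          pvUpd false v ((M.getD i0 []).getD k 0 + (G.getD k []).getD j0 0)
        else v) (some 0)
      = some (pvPos0 ((List.range G.length).foldl (fun v k =>
          if (M.getD i0 []).getD k 0 ≠ 0 ∧ (G.getD k []).getD j0 0 ≠ 0 ∧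
              (M.getD i0 []).getD k 0 + (G.getD k []).getD j0 0 ≠ 0 then
            pvUpd false v ((M.getD i0 []).getD k 0 + (G.getD k []).getD j0 0)
          else v) none)) :=
    pv_fold_pos0 _ (fun c x => pv_upd_pos0 c _ _) (List.range G.length) none
  rw [key]
  cases (List.range G.length).foldl (fun v k =>
      if (M.getD i0 []).getD k 0 ≠ 0 ∧ (G.getD k []).getD j0 0 ≠ 0 ∧
          (M.getD i0 []).getD k 0 + (G.getD k []).getD j0 0 ≠ 0 then
        pvUpd false v ((M.getD i0 []).getD k 0 + (G.getD k []).getD j0 0)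
      else v) none <;> simp [pvPos0]

theorem pv_foldl_app {α β : Type} (f : α → β) :
    ∀ (l : List α) (acc : List β),
      l.foldl (fun r x => r ++ [f x]) acc = acc ++ l.map f := by
  intro l
  induction l with
  | nil => simp
  | cons x xs ih => intro acc; simp [List.foldl, ih]

theorem pv_mul_eq (M G : List (List Int)) (max_min : Bool)
    (hG : ∀ row ∈ G, G.length ≤ row.length) :
    pvA_mul M G max_min = pvB_mul (pvB_edges G) G.length max_min M := by
  unfold pvA_mul pvB_mul pvA_row
  simp only [pv_foldl_app, List.nil_append]
  cases max_min with
  | true =>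
    rw [if_pos rfl]
    refine List.map_congr_left (fun i hi => ?_)
    refine List.map_congr_left (fun j hj => ?_)
    exact pv_cell_eq_min G M hG i j (List.mem_range.mp hi) (List.mem_range.mp hj)
  | false =>
    rw [if_neg (by simp)]
    refine List.map_congr_left (fun i hi => ?_)
    refine List.map_congr_left (fun j hj => ?_)
    exact pv_cell_eq_max G M hG i j (List.mem_range.mp hi) (List.mem_range.mp hj)

theorem pv_loopA_iterate (G : List (List Int)) (max_min : Bool) :
    ∀ (m : Nat) (len : Int) (sh : List (List Int)), (len - 1).toNat = m →
      pvA_loop len sh G max_min = (fun M => pvA_mul M G max_min)^[m] sh := by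
  intro m
  induction m with
  | zero =>
    intro len sh hm
    rw [pvA_loop]
    simp only [Function.iterate_zero, id]
    rw [if_neg (by omega)]
  | succ m ih =>
    intro len sh hm
    rw [pvA_loop, if_pos (by omega)]
    rw [ih (len - 1) _ (by omega)]
    rw [Function.iterate_succ_apply]

theorem pv_foldl_const {α β : Type} (g : α → α) :
    ∀ (l : List β) (s : α), l.foldl (fun M _ => g M) s = g^[l.length] s := by
  intro l
  induction l with
  | nil => intro s; rfl
  | cons x xs ih =>
    intro s
    simp only [List.foldl, List.length_cons, Function.iterate_succ_apply]
    exact ih (g s)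

-- ===== VERDICT (by name: the statement is the Claim_ definition above) =====
theorem Shimbell_matrix_spec : Claim_equal_Shimbell_matrix := by
  intro length G max_min _ hpre
  unfold Spec_Shimbell_matrix Shimbell_matrix Shimbell_matrix_alt
  by_cases h1 : length = 1
  · rw [if_pos h1, if_neg (by omega), if_pos (by omega)]
  · rw [if_neg h1]
    by_cases h0 : length = 0
    · rw [if_pos h0, if_pos h0]
    · rw [if_neg h0, if_neg h0]
      by_cases hl : length ≤ 1
      · rw [if_pos hl, pvA_loop, if_neg (by omega)]
      · rw [if_neg hl]
        have hG : ∀ row ∈ G, G.length ≤ row.length := by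
          rcases hpre with h | h
          · omega
          · exact h
        rw [pv_loopA_iterate G max_min (length - 1).toNat length G rfl, pv_foldl_const]
        rw [PySem.List.length_pyRange_one]
        have hcnt : (length - 1 - 0).toNat = (length - 1).toNat := by omega
        rw [hcnt]
        have hfun : (fun M => pvA_mul M G max_min)
            = (fun M => pvB_mul (pvB_edges G) G.length max_min M) := by
          funext M
          exact pv_mul_eq M G max_min hG
        rw [hfun]
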